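-- pv_equiv track=rewrite | github.com/Njokosi/python | HackerRank/Interview Preparation Kit/String Manipulation/Making Anagrams.py | make_anagrams
-- ===== SOURCE A (Python) =====
-- from collections import Counter
--
-- def make_anagrams(str1, str2):
--     total = 0
--     len_str1 = len(str1)
--     len_str2 = len(str2)
--     str_ctr = Counter(str1)
--
--     for letter, repetition in str_ctr.items():
--         if letter in str2:
--             total += min(repetition, str2.count(letter))
--
--     return len_str1 + len_str2 - (2 * total)
-- ===== SOURCE B (Python) =====
-- def make_anagrams(str1, str2):
--     c1 = {}
--     for ch in str1:
--         c1[ch] = c1.get(ch, 0) + 1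
--     c2 = {}
--     for ch in str2:
--         c2[ch] = c2.get(ch, 0) + 1
--     total = 0
--     for ch in c1:
--         total += abs(c1[ch] - c2.get(ch, 0))
--     for ch in c2:
--         if ch not in c1:
--             total += c2[ch]
--     return total
-- ===== Notes on version B (the rewrite author's own statement) =====
-- stated objective: alternative
-- what changed: B builds frequency dicts for BOTH strings and sums absolute count differences over the union of their keys, replacing A's len1+len2-2*shared intersection formula and its repeated str2.count scans inside the loop.
import Mathlib
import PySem

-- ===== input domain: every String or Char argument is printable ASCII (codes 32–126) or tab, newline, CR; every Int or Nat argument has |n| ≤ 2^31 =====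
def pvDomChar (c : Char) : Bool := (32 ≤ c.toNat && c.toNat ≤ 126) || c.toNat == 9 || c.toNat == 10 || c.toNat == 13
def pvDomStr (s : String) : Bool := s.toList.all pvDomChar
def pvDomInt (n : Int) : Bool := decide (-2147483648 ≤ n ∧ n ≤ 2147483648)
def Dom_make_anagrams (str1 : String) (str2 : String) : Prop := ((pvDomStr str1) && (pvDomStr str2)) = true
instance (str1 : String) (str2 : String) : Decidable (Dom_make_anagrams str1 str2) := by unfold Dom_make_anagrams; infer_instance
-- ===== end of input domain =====

-- B sums |count1 - count2| over the union of both frequency tables (one dict per string,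
-- two key passes) instead of A's len1 + len2 - 2*(shared intersection) formula with its
-- per-key str2.count scans; an alternative decomposition with the same result.

-- ===== PORT A =====
def make_anagrams (str1 : String) (str2 : String) : Int :=
  let total : Int := 0
  let len_str1 : Int := PySem.Str.len str1
  let len_str2 : Int := PySem.Str.len str2
  let str_ctr : PySem.Dict Char Int := PySem.Dict.counter str1.toList
  let total := str_ctr.items.foldl (fun total p =>
    if PySem.Str.isIn (String.ofList [p.1]) str2 then
      total + min p.2 ((PySem.Str.count str2 (String.ofList [p.1]) : Int))
    else total) total
  len_str1 + len_str2 - (2 * total)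

-- ===== PORT B =====
def make_anagrams_alt (str1 : String) (str2 : String) : Int :=
  let c1 := str1.toList.foldl (fun d ch => d.insert ch (d.getD ch 0 + 1))
              (PySem.Dict.empty : PySem.Dict Char Int)
  let c2 := str2.toList.foldl (fun d ch => d.insert ch (d.getD ch 0 + 1))
              (PySem.Dict.empty : PySem.Dict Char Int)
  let total : Int := 0
  let total := c1.keys.foldl (fun t ch => t + |c1.getD ch 0 - c2.getD ch 0|) total
  let total := c2.keys.foldl (fun t ch =>
      if c1.contains ch then t else t + c2.getD ch 0) total
  total

-- ===== PRECONDITION & SPEC =====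
def Spec_make_anagrams (str1 : String) (str2 : String) (out : Int) : Prop := out = make_anagrams_alt str1 str2
instance (str1 : String) (str2 : String) (out : Int) : Decidable (Spec_make_anagrams str1 str2 out) := by unfold Spec_make_anagrams; infer_instance

-- ===== CLAIM (what is proved, stated in full; the proofs are below) =====
def Claim_equal_make_anagrams : Prop := ∀ (str1 : String) (str2 : String), Dom_make_anagrams str1 str2 → Spec_make_anagrams str1 str2 (make_anagrams str1 str2)

-- ===== LEMMAS AND PROOFS =====

theorem isIn_singleton (c : Char) (s : String) :
    PySem.Str.isIn (String.ofList [c]) s = decide (c ∈ s.toList) := by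
  by_cases hc : c ∈ s.toList
  · have := PySem.Chars.isIn_iff_infix (sub := [c]) (s := s.toList) |>.mpr
      ((List.singleton_infix_iff c s.toList).mpr hc)
    simp [PySem.Str.isIn_eq, this, hc]
  · have := PySem.Chars.isIn_eq_false_iff (sub := [c]) (s := s.toList) |>.mpr
      (by rw [List.singleton_infix_iff]; exact hc)
    simp [PySem.Str.isIn_eq, this, hc]

theorem count_go_singleton (c : Char) (l : List Char) (fuel acc : Nat) (h : l.length ≤ fuel) :
    PySem.Chars.count.go [c] fuel l acc = acc + l.count c := by
  induction l generalizing fuel acc with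
  | nil => cases fuel <;> simp [PySem.Chars.count.go]
  | cons x t ih =>
    cases fuel with
    | zero => simp at h
    | succ n =>
      have hn : t.length ≤ n := by simpa using h
      simp only [PySem.Chars.count.go]
      by_cases hx : x = c
      · subst hx
        simp only [List.isPrefixOf, beq_self_eq_true, Bool.true_and, if_pos]
        simp only [List.length_cons, List.length_nil, List.drop_succ_cons, List.drop_zero,
          Nat.zero_add]
        rw [ih n (acc + 1) hn]
        simp
        omega
      · simp only [List.isPrefixOf]
        rw [if_neg (by simp [Ne.symm hx])]
        rw [ih n acc hn]
        simp [hx]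

theorem count_singleton (s : String) (c : Char) :
    PySem.Str.count s (String.ofList [c]) = s.toList.count c := by
  simp only [PySem.Str.count_eq, String.toList_ofList]
  unfold PySem.Chars.count
  rw [if_neg (by simp)]
  rw [count_go_singleton c s.toList s.toList.length 0 le_rfl]
  exact Nat.zero_add _

-- sum over Set.ofList as Finset sum
theorem sum_ofList_eq_finset (cs : List Char) (g : Char → Int) :
    ((PySem.Set.ofList cs).map g).sum = ∑ x ∈ cs.toFinset, g x := by
  have hnd : (PySem.Set.ofList cs).Nodup := PySem.Set.nodup_ofList cs
  have hfs : (PySem.Set.ofList cs).toFinset = cs.toFinset := by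
    ext x; simp [List.mem_toFinset, PySem.Set.mem_ofList]
  rw [← hfs, List.sum_toFinset g hnd]

theorem foldl_ite_add {α : Type} (l : List α) (p : α → Prop) [DecidablePred p] (f : α → Int) (a : Int) :
    l.foldl (fun acc x => if p x then acc + f x else acc) a
      = a + (l.map (fun x => if p x then f x else 0)).sum := by
  induction l generalizing a with
  | nil => simp
  | cons x t ih =>
    by_cases h : p x <;> simp [h, ih] <;> ring

theorem foldl_ite_skip_add {α : Type} (l : List α) (p : α → Prop) [DecidablePred p] (f : α → Int) (a : Int) :
    l.foldl (fun acc x => if p x then acc else acc + f x) a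
      = a + (l.map (fun x => if p x then 0 else f x)).sum := by
  induction l generalizing a with
  | nil => simp
  | cons x t ih =>
    by_cases h : p x <;> simp [h, ih] <;> ring

theorem main_eq (str1 str2 : String) : make_anagrams str1 str2 = make_anagrams_alt str1 str2 := by
  simp only [make_anagrams, make_anagrams_alt,
    PySem.Dict.foldl_insert_getD_add_one_eq_counter,
    PySem.Dict.items_counter, PySem.Dict.keys_counter,
    List.foldl_map, isIn_singleton, count_singleton,
    PySem.Dict.getD_counter, PySem.Dict.contains_counter,
    decide_eq_true_eq, List.contains_eq_mem]
  rw [foldl_ite_add (p := fun y => y ∈ str2.toList)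
        (f := fun y => min ((str1.toList.count y : Int)) ((str2.toList.count y : Int)))]
  rw [PySem.List.foldl_add (g := fun ch =>
        |((str1.toList.count ch : Int)) - ((str2.toList.count ch : Int))|)]
  rw [foldl_ite_skip_add (p := fun ch => ch ∈ str1.toList)
        (f := fun ch => ((str2.toList.count ch : Int)))]
  simp only [zero_add]
  rw [sum_ofList_eq_finset, sum_ofList_eq_finset, sum_ofList_eq_finset]
  rw [PySem.Str.len_eq, PySem.Str.len_eq]
  have hcz : ∀ (cs : List Char) (x : Char), x ∉ cs → ((cs.count x : Int)) = 0 := by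
    intro cs x hx
    simp [List.count_eq_zero.mpr hx]
  have hlen : ∀ cs : List Char, ((cs.length : Int)) = ∑ x ∈ cs.toFinset, ((cs.count x : Int)) := by
    intro cs
    rw [← List.sum_toFinset_count_eq_length cs]
    push_cast
    rfl
  set U : Finset Char := str1.toList.toFinset ∪ str2.toList.toFinset with hU
  have hsub1 : str1.toList.toFinset ⊆ U := Finset.subset_union_left
  have hsub2 : str2.toList.toFinset ⊆ U := Finset.subset_union_right
  have hext : ∀ (cs : List Char) (g : Char → Int), cs.toFinset ⊆ U →
      (∀ x ∈ U, x ∉ cs → g x = 0) → (∑ x ∈ cs.toFinset, g x) = ∑ x ∈ U, g x := by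
    intro cs g hsub hz
    exact Finset.sum_subset hsub (fun x hx hnx => hz x hx (by simpa using hnx))
  rw [hlen str1.toList, hlen str2.toList]
  rw [hext str1.toList _ hsub1 (fun x _ hx => hcz _ _ hx)]
  rw [hext str2.toList _ hsub2 (fun x _ hx => hcz _ _ hx)]
  rw [hext str1.toList
        (fun x => if x ∈ str2.toList then min ((str1.toList.count x : Int)) ((str2.toList.count x : Int)) else 0)
        hsub1
        (fun x _ hx => by
          simp only [List.count_eq_zero.mpr hx, Nat.cast_zero]
          split_ifs with h
          · exact min_eq_left (Int.natCast_nonneg _)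
          · rfl)]
  have hB1 : (∑ x ∈ str1.toList.toFinset, |((str1.toList.count x : Int)) - ((str2.toList.count x : Int))|)
      = ∑ x ∈ U, (if x ∈ str1.toList then |((str1.toList.count x : Int)) - ((str2.toList.count x : Int))| else 0) := by
    rw [← hext str1.toList _ hsub1 (fun x _ hx => by simp [hx])]
    exact Finset.sum_congr rfl (fun x hx => by simp [List.mem_toFinset.mp hx])
  rw [hB1]
  rw [hext str2.toList
        (fun x => if x ∈ str1.toList then 0 else ((str2.toList.count x : Int)))
        hsub2
        (fun x _ hx => by
          simp only [List.count_eq_zero.mpr hx, Nat.cast_zero]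
          split_ifs <;> rfl)]
  rw [← Finset.sum_add_distrib, ← Finset.sum_add_distrib, Finset.mul_sum, ← Finset.sum_sub_distrib]
  refine Finset.sum_congr rfl (fun x _ => ?_)
  by_cases h1 : x ∈ str1.toList <;> by_cases h2 : x ∈ str2.toList <;>
    simp only [h1, h2, if_true, if_false]
  · rcases le_total ((str1.toList.count x : Int)) ((str2.toList.count x : Int)) with h | h
    · rw [abs_of_nonpos (by omega)]
      omega
    · rw [abs_of_nonneg (by omega)]
      omega
  · rw [hcz _ _ h2]
    rw [abs_of_nonneg (by simp)]
    ring
  · rw [hcz _ _ h1]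
    have : (0:Int) ≤ (str2.toList.count x : Int) := Int.natCast_nonneg _
    omega
  · rw [hcz _ _ h1, hcz _ _ h2]
    norm_num

-- ===== VERDICT (by name: the statement is the Claim_ definition above) =====
theorem make_anagrams_spec : Claim_equal_make_anagrams := by
  intro str1 str2 _
  unfold Spec_make_anagrams
  exact main_eq str1 str2
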